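-- pv_equiv track=rewrite | github.com/kamyarghiam/Deciduo | RunProgram.py | splitLinesOfSentence
-- ===== SOURCE A (Python) =====
-- def splitLinesOfSentence(sentence):
-- 	count = 0
-- 	splitSentences = []
-- 	lastIndex = 0
-- 	for letter in range(len(sentence)):
-- 		count += 1
-- 		if sentence[letter] == " ":
-- 			if count > 90:
-- 				splitSentences.append(sentence[lastIndex:letter])
-- 				lastIndex = letter
-- 				count = 0
-- 		if letter == len(sentence) -1:
-- 			splitSentences.append(sentence[lastIndex:])
-- 	return splitSentences
-- ===== SOURCE B (Python) =====
-- def splitLinesOfSentence(sentence):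
--     # Skip-ahead with str.find: jump straight to the first space at least 91
--     # characters after the previous split point (90 for the first chunk),
--     # instead of scanning and counting every character.
--     out = []
--     start = 0
--     nxt = 90
--     while True:
--         i = sentence.find(" ", nxt)
--         if i == -1:
--             break
--         out.append(sentence[start:i])
--         start = i
--         nxt = i + 91
--     if sentence:
--         out.append(sentence[start:])
--     return out
-- ===== Notes on version B (the rewrite author's own statement) =====
-- stated objective: faster
-- what changed: B replaces A's per-character loop that counts every character and tests each for being a space with a while-loop that calls str.find to jump directly to the first space at least 91 characters past the previous split point, skipping the intervening characters entirely.
import Mathlib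
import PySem

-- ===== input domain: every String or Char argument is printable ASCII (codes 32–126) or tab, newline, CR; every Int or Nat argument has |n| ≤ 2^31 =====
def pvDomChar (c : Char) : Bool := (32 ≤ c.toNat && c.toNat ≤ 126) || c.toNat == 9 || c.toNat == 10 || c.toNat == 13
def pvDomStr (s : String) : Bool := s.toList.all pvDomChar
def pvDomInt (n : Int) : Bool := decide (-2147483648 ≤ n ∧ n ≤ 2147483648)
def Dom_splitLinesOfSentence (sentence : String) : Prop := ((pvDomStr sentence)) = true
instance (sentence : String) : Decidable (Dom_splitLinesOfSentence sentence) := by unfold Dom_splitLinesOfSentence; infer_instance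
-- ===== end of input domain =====

-- B replaces A's per-character counting loop with a str.find skip-ahead loop that
-- jumps directly to the next admissible split point (objective: faster, constant-factor).

-- ===== PORT A =====
-- loop body of A's 'for letter in range(len(sentence))'; state = (count, splitSentences, lastIndex)
def pvBodyA (sentence : String) (n : Int) (st : Int × List String × Int) (letter : Int) :
    Int × List String × Int :=
  let count := st.1 + 1
  let s1 : Int × List String × Int :=
    if PySem.Str.pyGet? sentence letter = some ' ' then
      if count > 90 then
        (0, st.2.1 ++ [PySem.Str.slice sentence (some st.2.2) (some letter)], letter)
      else (count, st.2.1, st.2.2)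
    else (count, st.2.1, st.2.2)
  if letter = n - 1 then
    (s1.1, s1.2.1 ++ [PySem.Str.slice sentence (some s1.2.2) none], s1.2.2)
  else s1

def splitLinesOfSentence (sentence : String) : List String :=
  let n : Int := PySem.Str.len sentence
  ((PySem.List.pyRange 0 n 1).foldl (pvBodyA sentence n) (0, [], 0)).2.1

-- ===== PORT B =====
-- bounds of a successful find, used only for termination of B's while loop
lemma pvFind_bounds (l : List Char) (k : Nat)
    (h : PySem.Chars.findFrom l [' '] (k : Int) none ≠ -1) :
    k ≤ (PySem.Chars.findFrom l [' '] (k : Int) none).toNat ∧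
      (PySem.Chars.findFrom l [' '] (k : Int) none).toNat < l.length := by
  by_cases hk : k ≤ l.length
  · obtain ⟨h1, h2, _⟩ := PySem.Chars.findFrom_natCast_spec l [' '] k hk h
    have hk' : k ≤ (PySem.Chars.findFrom l [' '] (k : Int) none).toNat := by
      have := Int.toNat_le_toNat h1; simpa using this
    refine ⟨hk', ?_⟩
    by_contra hge
    rw [List.drop_eq_nil_of_le (by omega)] at h2
    exact List.cons_ne_nil _ _ (List.prefix_nil.mp h2)
  · exfalso; apply h
    simp [PySem.Chars.findFrom]
    intro h1; omega

-- B's 'while True' loop; state = (out, start); nxt is the find start position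
def pvLoopB (sentence : String) (out : List String) (start nxt : Nat) : List String × Nat :=
  let i := PySem.Str.findFrom sentence " " (nxt : Int) none
  if h : i = -1 then (out, start)
  else
    pvLoopB sentence (out ++ [PySem.Str.slice sentence (some (start : Int)) (some i)])
      i.toNat (i.toNat + 91)
termination_by sentence.toList.length + 1 - nxt
decreasing_by
  have hc : (" ".toList : List Char) = [' '] := rfl
  simp only [PySem.Str.findFrom_eq, hc] at h ⊢
  have hb := pvFind_bounds sentence.toList nxt h
  omega

def splitLinesOfSentence_alt (sentence : String) : List String :=
  let st := pvLoopB sentence [] 0 90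
  if sentence.toList = [] then st.1
  else st.1 ++ [PySem.Str.slice sentence (some (st.2 : Int)) none]

-- ===== PRECONDITION & SPEC =====
def Spec_splitLinesOfSentence (sentence : String) (out : List String) : Prop := out = splitLinesOfSentence_alt sentence
instance (sentence : String) (out : List String) : Decidable (Spec_splitLinesOfSentence sentence out) := by unfold Spec_splitLinesOfSentence; infer_instance

-- ===== CLAIM (what is proved, stated in full; the proofs are below) =====
def Claim_equal_splitLinesOfSentence : Prop := ∀ (sentence : String), Dom_splitLinesOfSentence sentence → Spec_splitLinesOfSentence sentence (splitLinesOfSentence sentence)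

-- ===== LEMMAS AND PROOFS =====

-- find returns -1 when no space occurs at or after k
lemma pvFind_neg (l : List Char) (k : Nat)
    (h : ∀ t, k ≤ t → (ht : t < l.length) → l[t] ≠ ' ') :
    PySem.Chars.findFrom l [' '] (k : Int) none = -1 := by
  by_cases hk : k ≤ l.length
  · rw [PySem.Chars.findFrom_natCast_eq_neg_one_iff l [' '] k hk]
    intro hinf
    obtain ⟨i, hi, he⟩ := List.getElem_of_mem ((List.singleton_infix_iff ' ' (l.drop k)).mp hinf)
    rw [List.getElem_drop] at he
    have hi' : k + i < l.length := by simp at hi; omega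
    exact h (k + i) (by omega) hi' he
  · simp [PySem.Chars.findFrom]
    intro h1; omega

-- find returns the first space index ≥ k
lemma pvFind_pos (l : List Char) (k j : Nat) (hk : k ≤ j) (hj : j < l.length)
    (hsp : l[j] = ' ') (hmin : ∀ t, k ≤ t → (ht : t < l.length) → t < j → l[t] ≠ ' ') :
    PySem.Chars.findFrom l [' '] (k : Int) none = (j : Int) := by
  have hkl : k ≤ l.length := by omega
  have hpj : [' '] <+: l.drop j := by
    rw [List.drop_eq_getElem_cons hj, hsp]; exact ⟨_, rfl⟩
  have hne : PySem.Chars.findFrom l [' '] (k : Int) none ≠ -1 := by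
    rw [Ne, PySem.Chars.findFrom_natCast_eq_neg_one_iff l [' '] k hkl, not_not]
    have hmem : ' ' ∈ l.drop k := by
      refine List.mem_iff_getElem.mpr ⟨j - k, by simp; omega, ?_⟩
      rw [List.getElem_drop]
      have : k + (j - k) = j := by omega
      simp_rw [this]; exact hsp
    exact (List.singleton_infix_iff ' ' _).mpr hmem
  obtain ⟨h1, h2, h3⟩ := PySem.Chars.findFrom_natCast_spec l [' '] k hkl hne
  obtain ⟨hk', hlt⟩ := pvFind_bounds l k hne
  set f := PySem.Chars.findFrom l [' '] (k : Int) none with hf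
  have hfsp : l[f.toNat] = ' ' := by
    rw [List.drop_eq_getElem_cons hlt] at h2
    obtain ⟨u, hu⟩ := h2
    exact (List.cons.injEq _ _ _ _ ▸ hu).1.symm
  have hftj : f.toNat = j := by
    rcases Nat.lt_trichotomy f.toNat j with hcase | hcase | hcase
    · exact absurd hfsp (hmin f.toNat hk' hlt hcase)
    · exact hcase
    · exact absurd hpj (h3 j hk hcase)
  have hf0 : 0 ≤ f := le_trans (by exact_mod_cast Nat.zero_le k) h1
  omega

-- one-step unfoldings of B's while loop
lemma pvLoopB_none (sentence : String) (acc : List String) (start nxt : Nat)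
    (h : PySem.Chars.findFrom sentence.toList [' '] (nxt : Int) none = -1) :
    pvLoopB sentence acc start nxt = (acc, start) := by
  rw [pvLoopB]
  have hc : (" ".toList : List Char) = [' '] := rfl
  simp [PySem.Str.findFrom_eq, hc, h]

lemma pvLoopB_some (sentence : String) (acc : List String) (start nxt j : Nat)
    (h : PySem.Chars.findFrom sentence.toList [' '] (nxt : Int) none = (j : Int)) :
    pvLoopB sentence acc start nxt =
      pvLoopB sentence (acc ++ [PySem.Str.slice sentence (some (start : Int)) (some (j : Int))])
        j (j + 91) := by
  rw [pvLoopB]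
  have hc : (" ".toList : List Char) = [' '] := rfl
  have hne : ((j : Nat) : Int) ≠ -1 := by omega
  simp [PySem.Str.findFrom_eq, hc, h, hne]

-- main invariant: A's loop from index j with count = j + 90 - nxt agrees with B's
-- find-loop started at position nxt, followed by the remainder append
lemma pvMain (sentence : String) :
    ∀ (k j : Nat) (acc : List String) (start nxt : Nat),
      j + k = sentence.toList.length → 90 ≤ nxt → nxt < j + 91 →
      (∀ t, nxt ≤ t → t < j → (ht : t < sentence.toList.length) → sentence.toList[t] ≠ ' ') →
      (((PySem.List.pyRange (j : Int) (sentence.toList.length : Int) 1).foldl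
          (pvBodyA sentence (sentence.toList.length : Int))
          ((j : Int) + 90 - (nxt : Int), acc, (start : Int))).2.1)
      =
      (if j < sentence.toList.length then
         (pvLoopB sentence acc start nxt).1 ++
           [PySem.Str.slice sentence (some (((pvLoopB sentence acc start nxt).2 : Nat) : Int)) none]
       else (pvLoopB sentence acc start nxt).1) := by
  intro k
  induction k with
  | zero =>
      intro j acc start nxt hjk h90 hlt hsp
      rw [PySem.List.pyRange_one_eq_nil (by omega),
        pvLoopB_none sentence acc start nxt
          (pvFind_neg _ _ (fun t ht1 ht2 => hsp t ht1 (by omega) ht2))]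
      simp only [List.foldl_nil]
      rw [if_neg (by omega)]
  | succ k ih =>
      intro j acc start nxt hjk h90 hlt hsp
      have hjlt : j < sentence.toList.length := by omega
      rw [PySem.List.pyRange_one_cons (by exact_mod_cast hjlt), if_pos hjlt]
      have hget : PySem.Str.pyGet? sentence (j : Int) = some sentence.toList[j] := by
        simp [List.getElem?_eq_getElem hjlt]
      simp only [List.foldl_cons, pvBodyA, hget]
      have hcnt : (j : Int) + 90 - (nxt : Int) + 1 = (j : Int) + 91 - (nxt : Int) := by ring
      simp only [hcnt]
      by_cases hlast : j + 1 = sentence.toList.length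
      · -- last iteration: the loop ends after this letter
        have hl : (j : Int) = (sentence.toList.length : Int) - 1 := by omega
        rw [if_pos hl, PySem.List.pyRange_one_eq_nil (by omega)]
        by_cases hspj : sentence.toList[j] = ' '
        · rw [if_pos (by rw [hspj])]
          by_cases hbig : (j : Int) + 91 - (nxt : Int) > 90
          · rw [if_pos hbig]
            rw [pvLoopB_some sentence acc start nxt j
              (pvFind_pos _ _ _ (by omega) hjlt hspj
                (fun t ht1 ht2 ht3 => hsp t ht1 ht3 ht2)),
              pvLoopB_none sentence _ j (j + 91)
                (pvFind_neg _ _ (fun t ht1 ht2 => by omega))]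
            simp
          · rw [if_neg hbig]
            rw [pvLoopB_none sentence acc start nxt
              (pvFind_neg _ _ (fun t ht1 ht2 => by
                rcases Nat.lt_or_ge t j with hc | hc
                · exact hsp t ht1 hc ht2
                · have : t = j := by omega
                  subst this
                  omega))]
            simp
        · rw [if_neg (by simpa using hspj)]
          rw [pvLoopB_none sentence acc start nxt
            (pvFind_neg _ _ (fun t ht1 ht2 => by
              rcases Nat.lt_or_ge t j with hc | hc
              · exact hsp t ht1 hc ht2
              · have : t = j := by omega
                subst this
                exact hspj))]
          simp
      · -- not the last letter: step and use the induction hypothesis at j + 1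
        have hl : ¬((j : Int) = (sentence.toList.length : Int) - 1) := by omega
        rw [if_neg hl]
        by_cases hspj : sentence.toList[j] = ' '
        · rw [if_pos (by rw [hspj])]
          by_cases hbig : (j : Int) + 91 - (nxt : Int) > 90
          · rw [if_pos hbig]
            rw [pvLoopB_some sentence acc start nxt j
              (pvFind_pos _ _ _ (by omega) hjlt hspj
                (fun t ht1 ht2 ht3 => hsp t ht1 ht3 ht2))]
            have H := ih (j + 1)
              (acc ++ [PySem.Str.slice sentence (some (start : Int)) (some (j : Int))])
              j (j + 91) (by omega) (by omega) (by omega)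
              (fun t ht1 ht2 ht3 => by omega)
            rw [if_pos (by omega)] at H
            have e : ((j + 1 : Nat) : Int) + 90 - ((j + 91 : Nat) : Int) = 0 := by push_cast; ring
            rw [e] at H
            exact H
          · rw [if_neg hbig]
            have H := ih (j + 1) acc start nxt (by omega) h90 (by omega)
              (fun t ht1 ht2 ht3 => by
                rcases Nat.lt_or_ge t j with hc | hc
                · exact hsp t ht1 hc ht3
                · have : t = j := by omega
                  subst this
                  omega)
            rw [if_pos (by omega)] at H
            have e : ((j + 1 : Nat) : Int) + 90 - (nxt : Int) = (j : Int) + 91 - (nxt : Int) := by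
              push_cast; ring
            rw [e] at H
            exact H
        · rw [if_neg (by simpa using hspj)]
          have H := ih (j + 1) acc start nxt (by omega) h90 (by omega)
            (fun t ht1 ht2 ht3 => by
              rcases Nat.lt_or_ge t j with hc | hc
              · exact hsp t ht1 hc ht3
              · have : t = j := by omega
                subst this
                exact hspj)
          rw [if_pos (by omega)] at H
          have e : ((j + 1 : Nat) : Int) + 90 - (nxt : Int) = (j : Int) + 91 - (nxt : Int) := by
            push_cast; ring
          rw [e] at H
          exact H

theorem pv_equal (sentence : String) :
    splitLinesOfSentence sentence = splitLinesOfSentence_alt sentence := by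
  by_cases h : sentence.toList = []
  · simp [splitLinesOfSentence, splitLinesOfSentence_alt, h, PySem.Str.len_eq,
      PySem.List.pyRange_one_eq_nil (le_refl (0 : Int)),
      pvLoopB_none sentence [] 0 90 (pvFind_neg _ _ (fun t ht1 ht2 => by simp [h] at ht2))]
  · have hn : 0 < sentence.toList.length := List.length_pos_iff.mpr h
    have H := pvMain sentence sentence.toList.length 0 [] 0 90 (by omega) (by omega) (by omega)
      (fun t ht1 ht2 ht3 => by omega)
    rw [if_pos hn] at H
    have h0 : ((0 : Nat) : Int) + 90 - ((90 : Nat) : Int) = 0 := by norm_num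
    rw [h0] at H
    simp only [splitLinesOfSentence, splitLinesOfSentence_alt, PySem.Str.len_eq, if_neg h]
    exact H

-- ===== VERDICT (by name: the statement is the Claim_ definition above) =====
theorem splitLinesOfSentence_spec : Claim_equal_splitLinesOfSentence := by
  intro sentence _
  exact pv_equal sentence
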